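-- pv_equiv track=rewrite | github.com/lmsanch/llm_trading | backend/cache/keys.py | validate_key
-- ===== SOURCE A (Python) =====
-- PREFIX_RESEARCH = "research"
--
-- PREFIX_MARKET = "market"
--
-- PREFIX_PITCHES = "pitches"
--
-- PREFIX_GRAPHS = "graphs"
--
-- PREFIX_DATA_PACKAGE = "data_package"
--
-- def validate_key(key: str) -> bool:
--     """
--     Validate that a cache key follows the naming convention.
--
--     Args:
--         key: Cache key string
--
--     Returns:
--         True if valid, False otherwise
--
--     Examples:
--         >>> validate_key("research:report:abc123")
--         True
--
--         >>> validate_key("invalid_key")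
--         False
--
--         >>> validate_key("research:")
--         False
--     """
--     if not key or not isinstance(key, str):
--         return False
--
--     parts = key.split(":")
--
--     # Must have at least 2 parts (category:subcategory)
--     if len(parts) < 2:
--         return False
--
--     # Category must be valid
--     valid_categories = {
--         PREFIX_RESEARCH,
--         PREFIX_MARKET,
--         PREFIX_PITCHES,
--         PREFIX_GRAPHS,
--         PREFIX_DATA_PACKAGE,
--     }
--
--     if parts[0] not in valid_categories:
--         return False
--
--     # All parts must be non-empty
--     if any(not part for part in parts):
--         return False
--
--     return True
-- ===== SOURCE B (Python) =====
-- def validate_key(key: str) -> bool: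
--     if not key or not isinstance(key, str):
--         return False
--     prefixes = tuple(c + ":" for c in ("research", "market", "pitches", "graphs", "data_package"))
--     return key.startswith(prefixes) and not key.endswith(":") and "::" not in key
-- ===== Notes on version B (the rewrite author's own statement) =====
-- stated objective: simpler
-- what changed: B never builds the split(":") parts list: it validates the key by string shape alone - startswith one of the 'category:' prefixes (which enforces both a valid first segment and at least one colon), plus no trailing ':' and no '::' substring (which enforce all segments non-empty).
import Mathlib
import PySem

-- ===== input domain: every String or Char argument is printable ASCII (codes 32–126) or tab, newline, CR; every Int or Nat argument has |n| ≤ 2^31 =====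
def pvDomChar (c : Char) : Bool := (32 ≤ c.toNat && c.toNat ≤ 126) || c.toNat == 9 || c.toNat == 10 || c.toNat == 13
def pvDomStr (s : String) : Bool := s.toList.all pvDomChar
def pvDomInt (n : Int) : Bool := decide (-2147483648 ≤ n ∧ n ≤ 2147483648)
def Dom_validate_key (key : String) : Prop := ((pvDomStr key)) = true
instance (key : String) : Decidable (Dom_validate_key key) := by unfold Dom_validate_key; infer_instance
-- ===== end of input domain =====

-- B validates the key by string shape (a "category:" prefix, no trailing ":", no "::")
-- instead of building and scanning the split(":") parts list: simpler, no intermediate list.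


-- ===== PORT A =====
-- the module-level PREFIX_* constants, collected exactly as A's set literal does
def pyValidCategories : PySem.Set (List Char) :=
  PySem.Set.ofList
    ["research".toList, "market".toList, "pitches".toList, "graphs".toList, "data_package".toList]

def validate_key (key : String) : Bool :=
  if key = "" then false
  else
    let parts := PySem.Chars.splitOn key.toList ":".toList
    if parts.length < 2 then false
    else if !(pyValidCategories.contains (PySem.List.pyGetD parts 0 [])) then false
    else if parts.any (fun p => p.isEmpty) then false
    else true

-- ===== PORT B =====
def validate_key_alt (key : String) : Bool :=
  if key = "" then false
  else
    let prefixes := ["research", "market", "pitches", "graphs", "data_package"].map (fun c => c ++ ":")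
    (prefixes.any (fun p => PySem.Str.startswith key p))
      && !(PySem.Str.endswith key ":")
      && !(PySem.Str.isIn "::" key)

-- ===== PRECONDITION & SPEC =====
def Spec_validate_key (key : String) (out : Bool) : Prop := out = validate_key_alt key
instance (key : String) (out : Bool) : Decidable (Spec_validate_key key out) := by unfold Spec_validate_key; infer_instance

-- ===== CLAIM (what is proved, stated in full; the proofs are below) =====
def Claim_equal_validate_key : Prop := ∀ (key : String), Dom_validate_key key → Spec_validate_key key (validate_key key)

-- ===== LEMMAS AND PROOFS =====

-- reference recursion for Python's key.split(":") (single-character separator)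
def parts0 : List Char → List (List Char)
  | [] => [[]]
  | a :: rest => if a = ':' then [] :: parts0 rest else (parts0 rest).modifyHead (a :: ·)

theorem parts0_head (cs : List Char) :
    (parts0 cs).head? = some (cs.takeWhile (fun a => a != ':')) := by
  induction cs with
  | nil => rfl
  | cons a rest ih =>
    by_cases h : a = ':'
    · simp [parts0, h, List.takeWhile]
    · cases hp : parts0 rest with
      | nil => rw [hp] at ih; simp at ih
      | cons x t =>
        rw [hp] at ih; simp at ih
        simp [parts0, h, hp, ih]

theorem parts0_ne (cs : List Char) : parts0 cs ≠ [] := by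
  have := parts0_head cs
  intro h; rw [h] at this; simp at this

theorem splitOn_go_eq (fuel : Nat) (l cur : List Char) (acc : List (List Char)) (hf : l.length < fuel) :
    PySem.Chars.splitOn.go [':'] fuel l cur acc
      = acc.reverse ++ (parts0 l).modifyHead (cur.reverse ++ ·) := by
  induction fuel generalizing l cur acc with
  | zero => omega
  | succ n ih =>
    cases l with
    | nil => simp [PySem.Chars.splitOn.go, parts0]
    | cons a rest =>
      simp only [PySem.Chars.splitOn.go]
      by_cases h : a = ':'
      · subst h
        simp only [List.isPrefixOf, BEq.rfl, Bool.true_and, if_true,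
          List.drop_succ_cons, List.drop_zero, List.length]
        rw [ih rest [] _ (by simp at hf; omega)]
        cases hp : parts0 rest with
        | nil => exact absurd hp (parts0_ne rest)
        | cons x t => simp [parts0, hp]
      · have hpre : [':'].isPrefixOf (a :: rest) = false := by
          simp [List.isPrefixOf]; exact fun hh => absurd hh.symm h
        rw [hpre]
        simp only [if_false, Bool.false_eq_true]
        rw [ih rest (a :: cur) acc (by simp at hf; omega)]
        cases hp : parts0 rest with
        | nil => exact absurd hp (parts0_ne rest)
        | cons x t => simp [parts0, h, hp]

theorem splitOn_eq_parts0 (cs : List Char) :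
    PySem.Chars.splitOn cs [':'] = parts0 cs := by
  rw [PySem.Chars.splitOn, splitOn_go_eq _ _ _ _ (by omega)]
  cases hp : parts0 cs with
  | nil => exact absurd hp (parts0_ne cs)
  | cons x t => simp

theorem parts0_pos (cs : List Char) : 1 ≤ (parts0 cs).length := by
  cases hp : parts0 cs with
  | nil => exact absurd hp (parts0_ne cs)
  | cons x t => simp

theorem parts0_len (cs : List Char) :
    2 ≤ (parts0 cs).length ↔ ':' ∈ cs := by
  induction cs with
  | nil => simp [parts0]
  | cons a rest ih =>
    by_cases h : a = ':'
    · subst h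
      simp [parts0]
      have := parts0_pos rest; omega
    · simp [parts0, h, List.length_modifyHead, ih, List.mem_cons]
      intro hh; exact absurd hh.symm h

-- "no '::' inside and no trailing ':'": B's two shape checks on the raw string
def okT (cs : List Char) : Prop := ¬ ([':', ':'] <:+: cs) ∧ ¬ ([':'] <:+ cs)

theorem singleton_prefix_iff (cs : List Char) : [':'] <+: cs ↔ cs.head? = some ':' := by
  cases cs with
  | nil => simp
  | cons a t => simp [List.cons_prefix_cons, eq_comm]

theorem parts0_tail (cs : List Char) :
    (∀ x ∈ (parts0 cs).tail, x ≠ []) ↔ okT cs := by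
  induction cs with
  | nil => simp [parts0, okT]
  | cons a rest ih =>
    by_cases h : a = ':'
    · subst h
      have hd := parts0_head rest
      cases hp : parts0 rest with
      | nil => exact absurd hp (parts0_ne rest)
      | cons x t =>
        rw [hp] at hd; simp at hd
        rw [hp] at ih; simp at ih
        constructor
        · intro hall
          have hx : x ≠ [] := hall x (by simp [parts0, hp])
          have ht : ∀ y ∈ t, y ≠ [] := fun y hy => hall y (by simp [parts0, hp, hy])
          have hok := ih.mp ht
          constructor
          · rw [List.infix_cons_iff]
            rintro (hpre | hinf)
            · rw [List.cons_prefix_cons] at hpre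
              obtain ⟨-, hpre2⟩ := hpre
              rw [singleton_prefix_iff] at hpre2
              apply hx
              rw [hd]
              cases rest with
              | nil => simp at hpre2
              | cons b r =>
                simp at hpre2
                subst hpre2
                simp [List.takeWhile_cons]
            · exact hok.1 hinf
          · intro hsuf
            rw [List.suffix_cons_iff] at hsuf
            rcases hsuf with h1 | h2
            · have : rest = [] := by simpa using h1
              subst this
              simp [parts0] at hp
              exact hx hp.1
            · exact hok.2 h2
        · rintro ⟨hinf, hsuf⟩
          have hok : okT rest := by
            constructor
            · intro hh; exact hinf (List.infix_cons_iff.mpr (Or.inr hh))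
            · intro hh; exact hsuf (List.suffix_cons_iff.mpr (Or.inr hh))
          have hx : x ≠ [] := by
            intro hxe
            rw [hxe] at hd
            cases rest with
            | nil =>
              exact hsuf (List.suffix_cons_iff.mpr (Or.inl rfl))
            | cons b r =>
              by_cases hb : b = ':'
              · subst hb
                exact hinf (List.infix_cons_iff.mpr (Or.inl (by
                  rw [List.cons_prefix_cons]
                  exact ⟨rfl, singleton_prefix_iff _ |>.mpr rfl⟩)))
              · simp [hb] at hd
          intro y hy
          simp [parts0, hp] at hy
          rcases hy with h1 | h2
          · rw [h1]; exact hx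
          · exact (ih.mpr hok) y h2
    · cases hp : parts0 rest with
      | nil => exact absurd hp (parts0_ne rest)
      | cons x t =>
        have htail : (parts0 (a :: rest)).tail = t := by simp [parts0, h, hp]
        rw [hp] at ih; simp at ih
        rw [htail]
        rw [ih]
        unfold okT
        constructor
        · rintro ⟨hinf, hsuf⟩
          constructor
          · rw [List.infix_cons_iff]
            rintro (hpre | hi)
            · rw [List.cons_prefix_cons] at hpre; exact h hpre.1.symm
            · exact hinf hi
          · intro hs
            rw [List.suffix_cons_iff] at hs
            rcases hs with h1 | h2
            · rcases (show ':' = a ∧ rest = [] by simpa using h1) with ⟨ha, -⟩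
              exact h ha.symm
            · exact hsuf h2
        · rintro ⟨hinf, hsuf⟩
          exact ⟨fun hi => hinf (List.infix_cons_iff.mpr (Or.inr hi)),
                 fun hs => hsuf (List.suffix_cons_iff.mpr (Or.inr hs))⟩

theorem takeWhile_ne_nil_iff (cs : List Char) :
    cs.takeWhile (fun a => a != ':') ≠ [] ↔ cs ≠ [] ∧ cs.head? ≠ some ':' := by
  cases cs with
  | nil => simp
  | cons a t =>
    by_cases h : a = ':'
    · subst h; simp [List.takeWhile_cons]
    · simp [List.takeWhile_cons, h]

theorem parts0_all (cs : List Char) (h : cs ≠ []) :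
    (∀ x ∈ parts0 cs, x ≠ []) ↔ cs.head? ≠ some ':' ∧ okT cs := by
  have hd := parts0_head cs
  cases hp : parts0 cs with
  | nil => exact absurd hp (parts0_ne cs)
  | cons x t =>
    rw [hp] at hd; simp at hd
    have htail := parts0_tail cs; rw [hp] at htail; simp at htail
    constructor
    · intro hall
      have hx : x ≠ [] := hall x (by simp)
      refine ⟨?_, htail.mp fun y hy => hall y (by simp [hy])⟩
      rw [hd] at hx
      exact ((takeWhile_ne_nil_iff cs).mp hx).2
    · rintro ⟨hh, hok⟩ y hy
      simp at hy
      rcases hy with h1 | h2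
      · subst h1
        rw [hd]
        exact (takeWhile_ne_nil_iff cs).mpr ⟨h, hh⟩
      · exact (htail.mpr hok) y h2

theorem takeWhile_eq_of_append (p t : List Char) (hp : ':' ∉ p) :
    (p ++ ':' :: t).takeWhile (fun a => a != ':') = p := by
  induction p with
  | nil => simp [List.takeWhile_cons]
  | cons a q ih =>
    have ha : a ≠ ':' := fun hh => hp (by simp [hh])
    simp [List.takeWhile_cons, ha]
    exact ih (fun hh => hp (by simp [hh]))

theorem startswith_iff_takeWhile (cs p : List Char) (hp : ':' ∉ p) :
    ((p ++ [':']) <+: cs ↔ cs.takeWhile (fun a => a != ':') = p ∧ ':' ∈ cs) := by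
  constructor
  · rintro ⟨t, ht⟩
    rw [← ht]
    simp only [List.append_assoc, List.singleton_append]
    exact ⟨takeWhile_eq_of_append p t hp, by simp⟩
  · rintro ⟨htw, hmem⟩
    have hsplit := List.takeWhile_append_dropWhile (p := fun a => a != ':') (l := cs)
    set d := cs.dropWhile (fun a => a != ':') with hd
    cases hdc : d with
    | nil =>
      exfalso
      rw [hdc, List.append_nil] at hsplit
      rw [← hsplit] at hmem
      have := List.mem_takeWhile_imp hmem
      simp at this
    | cons b r =>
      have hb : (b != ':') = false := by
        have := List.head_dropWhile_not (p := fun a => a != ':') (l := cs)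
        rw [← hd, hdc] at this
        simpa using this (by simp)
      have hb' : b = ':' := by simpa using hb
      refine ⟨r, ?_⟩
      rw [← hsplit, htw, hdc, hb']
      simp

-- the five valid categories, on the List Char side
def catsL : List (List Char) :=
  ["research".toList, "market".toList, "pitches".toList, "graphs".toList, "data_package".toList]

theorem toList_ne_nil (key : String) (hk : key ≠ "") : key.toList ≠ [] := by
  intro h
  exact hk (String.toList_eq_nil_iff.mp h)

theorem A_iff (key : String) (hk : key ≠ "") :
    validate_key key = true ↔
      2 ≤ (parts0 key.toList).length ∧
      key.toList.takeWhile (fun a => a != ':') ∈ catsL ∧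
      (∀ x ∈ parts0 key.toList, x ≠ []) := by
  have hsp : PySem.Chars.splitOn key.toList ":".toList = parts0 key.toList := splitOn_eq_parts0 _
  have hd := parts0_head key.toList
  cases hp : parts0 key.toList with
  | nil => exact absurd hp (parts0_ne _)
  | cons x t =>
    rw [hp] at hd; simp at hd
    simp only [validate_key]
    rw [if_neg hk]
    simp only [hsp, hp]
    have hget : PySem.List.pyGetD (x :: t) 0 [] = x := by
      simp [PySem.List.pyGetD, PySem.List.pyGet?, PySem.List.pyIdx?]
    rw [hget]
    by_cases h2 : 2 ≤ (x :: t).length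
    · simp only [show ¬((x :: t).length < 2) from by omega, if_false]
      by_cases hmem : x ∈ catsL
      · have hcont : pyValidCategories.contains x = true := by
          have : x ∈ pyValidCategories := (PySem.Set.mem_ofList _ _).mpr hmem
          exact List.elem_eq_true_of_mem this
        simp only [hcont, Bool.not_true, if_false]
        by_cases hall : ∀ y ∈ x :: t, y ≠ []
        · have : (x :: t).any (fun p => p.isEmpty) = false := by
            simp only [List.any_eq_false]
            intro y hy; simpa [List.isEmpty_iff] using hall y hy
          simp only [this, Bool.false_eq_true, if_false]
          constructor
          · intro; exact ⟨h2, by rw [← hd]; exact hmem, hall⟩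
          · intro; trivial
        · have : (x :: t).any (fun p => p.isEmpty) = true := by
            simp only [List.any_eq_true]
            push_neg at hall
            obtain ⟨y, hy, hye⟩ := hall
            exact ⟨y, hy, by simp [List.isEmpty_iff, hye]⟩
          simp only [this, if_true]
          constructor
          · intro hh; simp at hh
          · rintro ⟨-, -, hall2⟩; exact absurd hall2 hall
      · have hcont : pyValidCategories.contains x = false := by
          rw [← Bool.not_eq_true]
          intro hc
          exact hmem ((PySem.Set.mem_ofList _ _).mp (List.mem_of_elem_eq_true hc))
        simp only [hcont, Bool.not_false, if_true]
        constructor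
        · intro hh; simp at hh
        · rintro ⟨-, hm, -⟩; rw [← hd] at hm; exact absurd hm hmem
    · simp only [show (x :: t).length < 2 from by omega, if_true]
      constructor
      · intro hh; simp at hh
      · rintro ⟨hl, -, -⟩; exact absurd hl h2

theorem B_iff (key : String) (hk : key ≠ "") :
    validate_key_alt key = true ↔
      (':' ∈ key.toList ∧ key.toList.takeWhile (fun a => a != ':') ∈ catsL) ∧ okT key.toList := by
  have h1 := startswith_iff_takeWhile key.toList "research".toList (by decide)
  have h2 := startswith_iff_takeWhile key.toList "market".toList (by decide)
  have h3 := startswith_iff_takeWhile key.toList "pitches".toList (by decide)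
  have h4 := startswith_iff_takeWhile key.toList "graphs".toList (by decide)
  have h5 := startswith_iff_takeWhile key.toList "data_package".toList (by decide)
  have es : (":" : String).toList = [':'] := by decide
  have ei : ("::" : String).toList = [':', ':'] := by decide
  simp only [validate_key_alt]
  rw [if_neg hk]
  simp only [List.map_cons, List.map_nil, List.any_cons, List.any_nil,
    Bool.and_eq_true, Bool.or_eq_true, Bool.not_eq_true', Bool.eq_false_iff, ne_eq,
    PySem.Str.startswith_eq, PySem.Str.endswith_eq, PySem.Str.isIn_eq,
    PySem.Chars.startswith_iff, PySem.Chars.endswith_iff, PySem.Chars.isIn_iff_infix,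
    String.toList_append, es, ei, h1, h2, h3, h4, h5]
  have m1 : "research".toList ∈ catsL := List.mem_cons_self
  have m2 : "market".toList ∈ catsL := List.mem_cons_of_mem _ List.mem_cons_self
  have m3 : "pitches".toList ∈ catsL := List.mem_cons_of_mem _ (List.mem_cons_of_mem _ List.mem_cons_self)
  have m4 : "graphs".toList ∈ catsL := List.mem_cons_of_mem _ (List.mem_cons_of_mem _ (List.mem_cons_of_mem _ List.mem_cons_self))
  have m5 : "data_package".toList ∈ catsL := List.mem_cons_of_mem _ (List.mem_cons_of_mem _ (List.mem_cons_of_mem _ (List.mem_cons_of_mem _ List.mem_cons_self)))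
  constructor
  · rintro ⟨⟨hany, hnsuf⟩, hninf⟩
    refine ⟨?_, hninf, hnsuf⟩
    rcases hany with ⟨htw, hm⟩ | ⟨htw, hm⟩ | ⟨htw, hm⟩ | ⟨htw, hm⟩ | ⟨htw, hm⟩ | h0
    · exact ⟨hm, htw ▸ m1⟩
    · exact ⟨hm, htw ▸ m2⟩
    · exact ⟨hm, htw ▸ m3⟩
    · exact ⟨hm, htw ▸ m4⟩
    · exact ⟨hm, htw ▸ m5⟩
    · exact absurd h0 (by simp)
  · rintro ⟨⟨hm, htw⟩, hninf, hnsuf⟩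
    refine ⟨⟨?_, hnsuf⟩, hninf⟩
    unfold catsL at htw
    simp only [List.mem_cons, List.not_mem_nil, or_false] at htw
    rcases htw with h | h | h | h | h
    · exact Or.inl ⟨h, hm⟩
    · exact Or.inr (Or.inl ⟨h, hm⟩)
    · exact Or.inr (Or.inr (Or.inl ⟨h, hm⟩))
    · exact Or.inr (Or.inr (Or.inr (Or.inl ⟨h, hm⟩)))
    · exact Or.inr (Or.inr (Or.inr (Or.inr (Or.inl ⟨h, hm⟩))))

theorem catsL_ne_nil_mem (x : List Char) (hx : x ∈ catsL) : x ≠ [] := by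
  unfold catsL at hx
  simp only [List.mem_cons, List.not_mem_nil, or_false] at hx
  rcases hx with h | h | h | h | h <;> (subst h; decide)

-- ===== VERDICT (by name: the statement is the Claim_ definition above) =====
theorem validate_key_spec : Claim_equal_validate_key := by
  intro key _
  unfold Spec_validate_key
  by_cases hk : key = ""
  · subst hk; rfl
  · have hcs := toList_ne_nil key hk
    rw [Bool.eq_iff_iff, A_iff key hk, B_iff key hk, parts0_len, parts0_all _ hcs]
    constructor
    · rintro ⟨hm, htw, hh, hok⟩; exact ⟨⟨hm, htw⟩, hok⟩
    · rintro ⟨⟨hm, htw⟩, hok⟩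
      refine ⟨hm, htw, ?_, hok⟩
      have hne : key.toList.takeWhile (fun a => a != ':') ≠ [] := catsL_ne_nil_mem _ htw
      exact ((takeWhile_ne_nil_iff key.toList).mp hne).2
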